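-- pv_equiv track=rewrite | github.com/GG4GG4/ggaggalang | ggaggalang/extensions.py | scan_for_functions
-- ===== SOURCE A (Python) =====
-- from typing import Dict, List, Tuple, Optional, Any
--
-- def scan_for_functions(commands: List[str]) -> Dict[int, Tuple[int, int]]:
--     """
--     코드에서 함수 정의 찾기
--
--     Args:
--         commands: 명령어 목록
--
--     Returns:
--         함수 테이블 (이름 -> (시작, 끝) 매핑)
--     """
--     functions: Dict[int, Tuple[int, int]] = {}
--     func_start_stack: List[int] = []
--     current_func_name: Optional[int] = None
--
--     for i, cmd in enumerate(commands):
--         if cmd == 'FUNC_DEF':  # 함수 정의 시작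
--             func_start_stack.append(i)
--         elif cmd == 'FUNC_END':  # 함수 정의 끝
--             if func_start_stack:
--                 start_pos = func_start_stack.pop()
--                 # 함수 이름은 시작 명령어 바로 앞 셀의 값이라고 가정
--                 func_name = start_pos  # 실제로는 런타임에 메모리에서 찾아야 함
--                 functions[func_name] = (start_pos + 1, i)
--
--     return functions
-- ===== SOURCE B (Python) =====
-- from typing import Dict, List, Optional, Tuple
--
--
-- def scan_for_functions(commands: List[str]) -> Dict[int, Tuple[int, int]]:
--     """Recursive-descent matcher: recursion follows the nesting structure.
--
--     parse(i, top) scans one nesting level starting at index i.  A FUNC_DEF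
--     opens a nested level parsed recursively; a FUNC_END closes the current
--     level (ignored at the top level).  Each level returns the (start, end)
--     pairs completed inside it in order of their closing position, the closing
--     index (or None if the level ran off the end unmatched, in which case the
--     opening FUNC_DEF is dropped), and the index where scanning resumes.
--     """
--     def parse(i: int, top: bool) -> Tuple[List[Tuple[int, int]], Optional[int], int]:
--         pairs: List[Tuple[int, int]] = []
--         while i < len(commands):
--             cmd = commands[i]
--             if cmd == 'FUNC_END' and not top:
--                 return pairs, i, i + 1
--             if cmd == 'FUNC_DEF':
--                 start = i
--                 inner, end, i = parse(i + 1, False)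
--                 pairs.extend(inner)
--                 if end is not None:
--                     pairs.append((start, end))
--             else:
--                 i += 1
--         return pairs, None, i
--
--     result, _, _ = parse(0, True)
--     return {start: (start + 1, end) for start, end in result}
-- ===== Notes on version B (the rewrite author's own statement) =====
-- stated objective: alternative
-- what changed: Replaces A's single forward pass with an explicit stack of open FUNC_DEF positions by a recursive-descent parser whose call structure follows the nesting of FUNC_DEF/FUNC_END: each level is scanned by a loop that recurses into nested definitions and returns its completed (start,end) pairs in closing order.
import Mathlib
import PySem

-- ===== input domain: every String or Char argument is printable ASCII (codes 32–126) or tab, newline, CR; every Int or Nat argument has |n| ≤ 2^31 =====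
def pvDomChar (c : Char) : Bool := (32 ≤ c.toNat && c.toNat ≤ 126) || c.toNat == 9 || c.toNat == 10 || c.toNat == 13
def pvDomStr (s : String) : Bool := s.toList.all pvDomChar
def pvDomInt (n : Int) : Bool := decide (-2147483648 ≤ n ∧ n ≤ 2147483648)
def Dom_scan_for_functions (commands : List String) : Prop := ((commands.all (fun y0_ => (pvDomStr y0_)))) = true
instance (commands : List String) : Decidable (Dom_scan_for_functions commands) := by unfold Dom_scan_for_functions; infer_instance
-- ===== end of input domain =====

-- B replaces A's forward scan with an explicit stack of open FUNC_DEF positions by a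
-- recursive-descent parser whose recursion follows the nesting of FUNC_DEF/FUNC_END;
-- alternative decomposition, same exact return value.

-- ===== PORT A =====
-- loop body of A: state = (functions dict, stack of FUNC_DEF positions), input = (i, cmd)
def stepA (st : PySem.Dict Int (Int × Int) × List Int) (p : Int × String) :
    PySem.Dict Int (Int × Int) × List Int :=
  if p.2 == "FUNC_DEF" then (st.1, p.1 :: st.2)
  else if p.2 == "FUNC_END" then
    match st.2 with
    | [] => st
    | s :: rest => (st.1.insert s (s + 1, p.1), rest)
  else st

def scan_for_functions (commands : List String) : List (Int × Int × Int) :=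
  (((PySem.List.enumerate commands 0).foldl stepA (PySem.Dict.empty, [])).1).items

-- ===== PORT B =====
-- parse(i, top) of Source B: scans one nesting level from index i; the while loop is the
-- structural recursion on the fuel (fuel = length + 1 suffices since the scan index
-- strictly advances); returns (pairs completed at or below this level, closing index
-- if a FUNC_END closed this level, resume index)
def parseB (commands : List String) : Nat → Nat → Bool → List (Int × Int) × Option Int × Nat
  | 0, i, _ => ([], none, i)
  | n + 1, i, top =>
    if _h : i < commands.length then
      let cmd := commands[i]
      if cmd == "FUNC_END" && !top then ([], some (Int.ofNat i), i + 1)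
      else if cmd == "FUNC_DEF" then
        let r1 := parseB commands n (i + 1) false
        let r2 := parseB commands n r1.2.2 top
        (r1.1 ++ (match r1.2.1 with
                  | some en => [((Int.ofNat i : Int), en)]
                  | none => []) ++ r2.1, r2.2.1, r2.2.2)
      else parseB commands n (i + 1) top
    else ([], none, i)

def scan_for_functions_alt (commands : List String) : List (Int × Int × Int) :=
  let P := (parseB commands (commands.length + 1) 0 true).1
  (P.foldl (fun d q => d.insert q.1 (q.1 + 1, q.2)) PySem.Dict.empty).items

-- ===== PRECONDITION & SPEC =====
def Spec_scan_for_functions (commands : List String) (out : List (Int × Int × Int)) : Prop := out = scan_for_functions_alt commands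
instance (commands : List String) (out : List (Int × Int × Int)) : Decidable (Spec_scan_for_functions commands out) := by unfold Spec_scan_for_functions; infer_instance

-- ===== CLAIM (what is proved, stated in full; the proofs are below) =====
def Claim_equal_scan_for_functions : Prop := ∀ (commands : List String), Dom_scan_for_functions commands → Spec_scan_for_functions commands (scan_for_functions commands)

-- ===== LEMMAS AND PROOFS =====

-- reference bracket matching: forward scan producing (start, end) pairs in END order
def Fp : List (Int × String) → List Int → List (Int × Int)
  | [], _ => []
  | p :: zs, st =>
    if p.2 == "FUNC_DEF" then Fp zs (p.1 :: st)
    else if p.2 == "FUNC_END" then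
      match st with
      | [] => Fp zs st
      | s :: rest => (s, p.1) :: Fp zs rest
    else Fp zs st

-- A's fold equals the reference pairs (the dict's keys stay fresh, so inserts append)
lemma A_items (zs : List (Int × String)) : ∀ (d : PySem.Dict Int (Int × Int)) (st : List Int),
    st.Nodup → (zs.map (·.1)).Nodup →
    (∀ s ∈ st, d.contains s = false) → (∀ p ∈ zs, d.contains p.1 = false) →
    (∀ s ∈ st, ∀ p ∈ zs, s ≠ p.1) →
    (zs.foldl stepA (d, st)).1.items
      = d.items ++ (Fp zs st).map (fun q => (q.1, q.1 + 1, q.2)) := by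
  induction zs with
  | nil => intro d st _ _ _ _ _; simp [Fp]
  | cons p zs ih =>
    intro d st hst hzs hd hdz hcr
    simp only [List.map_cons, List.nodup_cons] at hzs
    rw [List.foldl_cons]
    rcases eq_or_ne p.2 "FUNC_DEF" with hD | hD
    · -- DEF: push p.1
      have hstep : stepA (d, st) p = (d, p.1 :: st) := by simp [stepA, hD]
      rw [hstep]
      have hnotin : p.1 ∉ st := fun hm => hcr _ hm p (by simp) rfl
      rw [ih d (p.1 :: st) (List.nodup_cons.2 ⟨hnotin, hst⟩) hzs.2
        (by
          intro s hs
          rcases List.mem_cons.1 hs with rfl | hs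
          · exact hdz p (by simp)
          · exact hd _ hs)
        (fun q hq => hdz q (List.mem_cons_of_mem _ hq))
        (by
          intro s hs q hq
          rcases List.mem_cons.1 hs with rfl | hs
          · intro he; exact hzs.1 (he ▸ List.mem_map_of_mem hq)
          · exact hcr _ hs q (List.mem_cons_of_mem _ hq))]
      simp [Fp, hD]
    · rcases eq_or_ne p.2 "FUNC_END" with hEn | hEn
      · cases st with
        | nil =>
          have hstep : stepA (d, []) p = (d, []) := by simp [stepA, hEn]
          rw [hstep]
          rw [ih d [] List.nodup_nil hzs.2 (by simp)
            (fun q hq => hdz q (List.mem_cons_of_mem _ hq)) (by simp)]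
          simp [Fp, hEn]
        | cons s rest =>
          have hstep : stepA (d, s :: rest) p = (d.insert s (s + 1, p.1), rest) := by
            simp [stepA, hEn]
          rw [hstep]
          simp only [List.nodup_cons] at hst
          have hfresh : d.contains s = false := hd s (by simp)
          rw [ih (d.insert s (s + 1, p.1)) rest hst.2 hzs.2
            (by
              intro t ht
              rw [PySem.Dict.contains_insert]
              have : (t == s) = false := by
                simp only [beq_eq_false_iff_ne]
                exact fun he => hst.1 (he ▸ ht)
              rw [this, hd t (List.mem_cons_of_mem _ ht)]; rfl
            )
            (by
              intro q hq
              rw [PySem.Dict.contains_insert]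
              have : (q.1 == s) = false := by
                simp only [beq_eq_false_iff_ne]
                exact fun he => hcr s (by simp) q (List.mem_cons_of_mem _ hq) he.symm
              rw [this, hdz q (List.mem_cons_of_mem _ hq)]; rfl
            )
            (fun t ht q hq => hcr t (List.mem_cons_of_mem _ ht) q (List.mem_cons_of_mem _ hq))]
          rw [PySem.Dict.items_insert_of_not_contains _ _ hfresh]
          simp [Fp, hEn]
      · -- neutral
        have hstep : stepA (d, st) p = (d, st) := by simp [stepA, hD, hEn]
        rw [hstep]
        rw [ih d st hst hzs.2 hd (fun q hq => hdz q (List.mem_cons_of_mem _ hq))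
          (fun t ht q hq => hcr t ht q (List.mem_cons_of_mem _ hq))]
        simp [Fp, hD, hEn]

-- the start components of the forward pairs are distinct
lemma Fp_fst (zs : List (Int × String)) : ∀ st : List Int,
    st.Nodup → (zs.map (·.1)).Nodup → (∀ s ∈ st, ∀ p ∈ zs, s ≠ p.1) →
    ((Fp zs st).map (·.1)).Nodup ∧
      (∀ x ∈ (Fp zs st).map (·.1), x ∈ st ∨ x ∈ zs.map (·.1)) := by
  induction zs with
  | nil => intro st _ _ _; simp [Fp]
  | cons p zs ih =>
    intro st hst hzs hcr
    simp only [List.map_cons, List.nodup_cons] at hzs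
    simp only [Fp]
    split_ifs with h1 h2
    · -- DEF: push p.1
      have hnotin : p.1 ∉ st := fun hm => hcr _ hm p (by simp) rfl
      have h := ih (p.1 :: st) (List.nodup_cons.2 ⟨hnotin, hst⟩) hzs.2
        (by
          intro s hs q hq
          rcases List.mem_cons.1 hs with rfl | hs
          · intro he; exact hzs.1 (he ▸ List.mem_map_of_mem hq)
          · exact hcr _ hs q (List.mem_cons_of_mem _ hq))
      refine ⟨h.1, ?_⟩
      intro x hx
      rcases h.2 x hx with hm | hm
      · rcases List.mem_cons.1 hm with rfl | hm
        · exact Or.inr (by simp)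
        · exact Or.inl hm
      · exact Or.inr (by simp [hm])
    · -- END
      cases st with
      | nil =>
        have h := ih [] List.nodup_nil hzs.2 (by simp)
        refine ⟨h.1, ?_⟩
        intro x hx
        rcases h.2 x hx with hm | hm
        · simp at hm
        · exact Or.inr (by simp [hm])
      | cons s rest =>
        simp only [List.nodup_cons] at hst
        have h := ih rest hst.2 hzs.2
          (fun t ht q hq => hcr t (List.mem_cons_of_mem _ ht) q (List.mem_cons_of_mem _ hq))
        simp only [List.map_cons, List.nodup_cons]
        refine ⟨⟨?_, h.1⟩, ?_⟩
        · intro hm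
          rcases h.2 s hm with hm' | hm'
          · exact hst.1 hm'
          · rcases List.mem_map.1 hm' with ⟨q, hq, he⟩
            exact hcr s (by simp) q (List.mem_cons_of_mem _ hq) he.symm
        · intro x hx
          rcases List.mem_cons.1 hx with rfl | hx
          · exact Or.inl (by simp)
          · rcases h.2 x hx with hm | hm
            · exact Or.inl (List.mem_cons_of_mem _ hm)
            · exact Or.inr (by simp [hm])
    · -- neutral
      have h := ih st hst hzs.2
        (fun t ht q hq => hcr t ht q (List.mem_cons_of_mem _ hq))
      exact ⟨h.1, fun x hx => (h.2 x hx).imp id (fun hm => by simp [hm])⟩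

-- the enumerated suffix of commands from index i
def Esuf (commands : List String) (i : Nat) : List (Int × String) :=
  PySem.List.enumerate (commands.drop i) (Int.ofNat i)

lemma Esuf_cons (commands : List String) (i : Nat) (h : i < commands.length) :
    Esuf commands i = (Int.ofNat i, commands[i]) :: Esuf commands (i + 1) := by
  unfold Esuf
  rw [List.drop_eq_getElem_cons h, PySem.List.enumerate_cons]
  rfl

lemma Esuf_nil (commands : List String) (i : Nat) (h : commands.length ≤ i) :
    Esuf commands i = [] := by
  unfold Esuf
  rw [List.drop_eq_nil_of_le h, PySem.List.enumerate_nil]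

-- the scan index never moves backwards
lemma parseB_mono (commands : List String) : ∀ (n i : Nat) (top : Bool),
    i ≤ (parseB commands n i top).2.2 := by
  intro n
  induction n with
  | zero => intro i top; simp [parseB]
  | succ n ih =>
    intro i top
    by_cases h : i < commands.length
    · by_cases hEnd : (commands[i] == "FUNC_END" && !top) = true
      · simp only [parseB, dif_pos h, if_pos hEnd]
        exact Nat.le_succ i
      · by_cases hDef : (commands[i] == "FUNC_DEF") = true
        · have h1 := ih (i + 1) false
          have h2 := ih (parseB commands n (i + 1) false).2.2 top
          simp only [parseB, dif_pos h, if_neg hEnd, if_pos hDef]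
          omega
        · simp only [parseB, dif_pos h, if_neg hEnd, if_neg hDef]
          exact le_trans (Nat.le_succ i) (ih (i + 1) top)
    · simp only [parseB, dif_neg h]
      exact le_rfl

-- one-step unfoldings of the reference matcher
lemma Fp_def_cons (i : Int) (zs : List (Int × String)) (st : List Int) :
    Fp ((i, "FUNC_DEF") :: zs) st = Fp zs (i :: st) := by simp [Fp]

lemma Fp_end_cons (i s : Int) (zs : List (Int × String)) (st : List Int) :
    Fp ((i, "FUNC_END") :: zs) (s :: st) = (s, i) :: Fp zs st := by simp [Fp]

lemma Fp_end_nil (i : Int) (zs : List (Int × String)) :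
    Fp ((i, "FUNC_END") :: zs) [] = Fp zs [] := by simp [Fp]

lemma Fp_skip (p : Int × String) (zs : List (Int × String)) (st : List Int)
    (h1 : p.2 ≠ "FUNC_DEF") (h2 : p.2 ≠ "FUNC_END") :
    Fp (p :: zs) st = Fp zs st := by simp [Fp, h1, h2]

-- the key correctness lemma: with enough fuel, parseB computes the reference matching
-- (some e ⇒ a FUNC_END at e closed the level: Fp with one more open DEF splits there;
--  none ⇒ the suffix was consumed without closing: Fp is independent of the stack)
lemma parseB_spec (commands : List String) : ∀ (n i : Nat) (top : Bool),
    commands.length - i < n →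
    (∀ P e r, parseB commands n i top = (P, some e, r) →
      top = false ∧ ∀ s st, Fp (Esuf commands i) (s :: st) = P ++ (s, e) :: Fp (Esuf commands r) st) ∧
    (∀ P r, parseB commands n i top = (P, none, r) →
      commands.length ≤ r ∧ ∀ st, (top = false ∨ st = []) → Fp (Esuf commands i) st = P) := by
  intro n
  induction n with
  | zero => intro i top h; omega
  | succ n ih =>
    intro i top hfuel
    by_cases h : i < commands.length
    · have hE := Esuf_cons commands i h
      by_cases hEnd : (commands[i] == "FUNC_END" && !top) = true
      · -- closes this level
        have hcmd : commands[i] = "FUNC_END" := by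
          rcases (Bool.and_eq_true _ _).mp hEnd with ⟨hc, _⟩
          exact beq_iff_eq.1 hc
        have htop : top = false := by
          rcases (Bool.and_eq_true _ _).mp hEnd with ⟨_, ht⟩
          simpa using ht
        have hpb : parseB commands (n + 1) i top = ([], some (Int.ofNat i), i + 1) := by
          simp only [parseB, dif_pos h, if_pos hEnd]
        constructor
        · intro P e r hr
          rw [hpb] at hr
          injection hr with h1 h2; injection h2 with h2 h3
          subst h1; subst h3
          have he : e = Int.ofNat i := by injection h2.symm
          subst he
          refine ⟨htop, fun s st => ?_⟩
          rw [hE, hcmd, Fp_end_cons]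
          simp
        · intro P r hr
          rw [hpb] at hr
          exact absurd (congrArg (·.2.1) hr) (by simp)
      · by_cases hDef : (commands[i] == "FUNC_DEF") = true
        · -- opens a nested level
          have hcmd : commands[i] = "FUNC_DEF" := beq_iff_eq.1 hDef
          have hf1 : commands.length - (i + 1) < n := by omega
          have ih1 := ih (i + 1) false hf1
          rcases h1 : parseB commands n (i + 1) false with ⟨P1, e1, r1⟩
          have hmono1 : i + 1 ≤ r1 := by
            have := parseB_mono commands n (i + 1) false
            rw [h1] at this; exact this
          have hf2 : commands.length - r1 < n := by omega
          have ih2 := ih r1 top hf2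
          rcases h2 : parseB commands n r1 top with ⟨P2, e2, r2⟩
          cases e1 with
          | some en =>
            have hsp1 := (ih1.1 P1 en r1 h1).2
            have hpb' : parseB commands (n + 1) i top
                = (P1 ++ [((Int.ofNat i : Int), en)] ++ P2, e2, r2) := by
              simp [parseB, h, hcmd, h1, h2]
            constructor
            · intro P e r hr
              rw [hpb'] at hr
              injection hr with hP h'; injection h' with he hr'
              subst hP; subst hr'
              obtain ⟨htop, hsp2⟩ := ih2.1 P2 e r2 (by rw [h2, he])
              refine ⟨htop, fun s st => ?_⟩
              rw [hE, hcmd, Fp_def_cons]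
              rw [hsp1 (Int.ofNat i) (s :: st), hsp2 s st]
              simp
            · intro P r hr
              rw [hpb'] at hr
              injection hr with hP h'; injection h' with he hr'
              subst hP; subst hr'
              obtain ⟨hlen2, hsp2⟩ := ih2.2 P2 r2 (by rw [h2, he])
              refine ⟨hlen2, fun st hst => ?_⟩
              rw [hE, hcmd, Fp_def_cons]
              cases st with
              | nil =>
                rw [hsp1 (Int.ofNat i) [], hsp2 [] (Or.inr rfl)]
                simp
              | cons s st' =>
                have htop : top = false := by
                  rcases hst with ht | hne
                  · exact ht
                  · exact absurd hne (by simp)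
                rw [hsp1 (Int.ofNat i) (s :: st'), hsp2 (s :: st') (Or.inl htop)]
                simp
          | none =>
            obtain ⟨hlen1, hsp1⟩ := ih1.2 P1 r1 h1
            have hstop : parseB commands n r1 top = ([], none, r1) := by
              cases n with
              | zero => omega
              | succ m => simp [parseB, Nat.not_lt.2 hlen1]
            rw [hstop] at h2
            injection h2 with hP2 h2'; injection h2' with he2 hr2
            have hpb' : parseB commands (n + 1) i top = (P1, none, r1) := by
              simp [parseB, h, hcmd, h1, hstop]
            constructor
            · intro P e r hr
              rw [hpb'] at hr
              injection hr with _ h'; injection h' with he _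
              exact absurd he (by simp)
            · intro P r hr
              rw [hpb'] at hr
              injection hr with hP h'; injection h' with _ hr'
              subst hP; subst hr'
              refine ⟨hlen1, fun st _ => ?_⟩
              rw [hE, hcmd, Fp_def_cons]
              exact hsp1 (Int.ofNat i :: st) (Or.inl rfl)
        · -- neutral command: skip
          have hpb : parseB commands (n + 1) i top = parseB commands n (i + 1) top := by
            simp only [parseB, dif_pos h, if_neg hEnd, if_neg hDef]
          have ih1 := ih (i + 1) top (by omega)
          have hDef' : commands[i] ≠ "FUNC_DEF" := fun hc => hDef (beq_iff_eq.2 hc)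
          constructor
          · intro P e r hr
            rw [hpb] at hr
            obtain ⟨htop, hsp⟩ := ih1.1 P e r hr
            refine ⟨htop, fun s st => ?_⟩
            rw [hE]
            have hEnd' : commands[i] ≠ "FUNC_END" := by
              intro hc
              exact hEnd (by simp [hc, htop])
            rw [Fp_skip _ _ _ hDef' hEnd', hsp s st]
          · intro P r hr
            rw [hpb] at hr
            obtain ⟨hlen, hsp⟩ := ih1.2 P r hr
            refine ⟨hlen, fun st hst => ?_⟩
            rw [hE]
            by_cases hc : commands[i] = "FUNC_END"
            · -- an END skipped at the top level: the stack is empty there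
              have htop : top = true := by
                cases ht : top
                · exact absurd (by simp [hc, ht]) hEnd
                · rfl
              have hst' : st = [] := by
                rcases hst with h' | h'
                · rw [htop] at h'; exact absurd h' (by simp)
                · exact h'
              subst hst'
              rw [hc, Fp_end_nil]
              exact hsp [] hst
            · rw [Fp_skip _ _ _ hDef' hc]
              exact hsp st hst
    · -- past the end
      have hpb : parseB commands (n + 1) i top = ([], none, i) := by
        simp only [parseB, dif_neg h]
      constructor
      · intro P e r hr
        rw [hpb] at hr
        exact absurd (congrArg (·.2.1) hr) (by simp)
      · intro P r hr
        rw [hpb] at hr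
        injection hr with hP h'
        injection h' with _ hr'
        subst hP; subst hr'
        refine ⟨Nat.le_of_not_lt h, fun st _ => ?_⟩
        rw [Esuf_nil commands i (Nat.le_of_not_lt h)]
        simp [Fp]

-- ===== VERDICT (by name: the statement is the Claim_ definition above) =====
theorem scan_for_functions_spec : Claim_equal_scan_for_functions := by
  intro commands _
  unfold Spec_scan_for_functions
  show scan_for_functions commands = scan_for_functions_alt commands
  set e := PySem.List.enumerate commands 0 with he
  have hpw : (e.map (·.1)).Pairwise (· < ·) := by
    rw [he]
    exact List.pairwise_map.2 (PySem.List.pairwise_lt_enumerate commands 0)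
  have hnd : (e.map (·.1)).Nodup :=
    hpw.imp (fun h => by omega)
  have hA : scan_for_functions commands
      = (Fp e []).map (fun q => (q.1, q.1 + 1, q.2)) := by
    have := A_items e PySem.Dict.empty [] List.nodup_nil hnd
      (by simp) (by simp [PySem.Dict.contains_empty]) (by simp)
    simpa [scan_for_functions] using this
  -- B's recursive descent computes Fp e []
  have hE0 : Esuf commands 0 = e := by
    unfold Esuf; rw [he]; rfl
  rcases hb : parseB commands (commands.length + 1) 0 true with ⟨P, eopt, r⟩
  have hsp := parseB_spec commands (commands.length + 1) 0 true (by omega)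
  have hP : Fp e [] = P := by
    cases eopt with
    | some x =>
      have := (hsp.1 P x r hb).1
      exact absurd this (by simp)
    | none =>
      have := (hsp.2 P r hb).2 [] (Or.inr rfl)
      rw [hE0] at this
      exact this
  have hfnd : ((Fp e []).map (·.1)).Nodup :=
    (Fp_fst e [] List.nodup_nil hnd (by simp)).1
  have hB : scan_for_functions_alt commands
      = (Fp e []).map (fun q => (q.1, q.1 + 1, q.2)) := by
    show ((parseB commands (commands.length + 1) 0 true).1.foldl
        (fun d q => d.insert q.1 (q.1 + 1, q.2)) PySem.Dict.empty).items = _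
    rw [hb]
    simp only
    rw [← hP]
    rw [PySem.Dict.items_foldl_insert_fresh (Fp e []) (fun q => q.1)
      (fun q => (q.1 + 1, q.2)) PySem.Dict.empty
      (by simp [PySem.Dict.contains_empty]) hfnd]
    simp [PySem.Dict.empty]
  rw [hA, hB]
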